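-- pv_equiv track=rewrite | github.com/Mrityunjai123/Archi_project | streamlit_app.py | _process_building_measurements
-- ===== SOURCE A (Python) =====
-- def _process_building_measurements(measurements):
--     summary = {}
--
--     # Find area
--     areas = [m for m in measurements if 'area' in m['type']]
--     if areas:
--         explicit_areas = [a for a in areas if 'calculated' not in a['type']]
--         summary['area'] = explicit_areas[0] if explicit_areas else areas[0]
--
--     # Find height
--     heights = [m for m in measurements if 'height' in m['type']]
--     if heights:
--         summary['height'] = heights[0]
--
--     return summary
-- ===== SOURCE B (Python) =====
-- def _process_building_measurements(measurements):
--     first_explicit_area = None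
--     first_area = None
--     first_height = None
--     for m in measurements:
--         t = m['type']
--         if first_explicit_area is None and 'area' in t and 'calculated' not in t:
--             first_explicit_area = m
--         if first_area is None and 'area' in t:
--             first_area = m
--         if first_height is None and 'height' in t:
--             first_height = m
--     summary = {}
--     if first_area is not None:
--         summary['area'] = first_explicit_area if first_explicit_area is not None else first_area
--     if first_height is not None:
--         summary['height'] = first_height
--     return summary
-- ===== Notes on version B (the rewrite author's own statement) =====
-- stated objective: alternative
-- what changed: Replaces A's three list comprehensions (two full filters plus a filter over the areas) with a single pass keeping three first-match accumulators and building the summary from them.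
import Mathlib
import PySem

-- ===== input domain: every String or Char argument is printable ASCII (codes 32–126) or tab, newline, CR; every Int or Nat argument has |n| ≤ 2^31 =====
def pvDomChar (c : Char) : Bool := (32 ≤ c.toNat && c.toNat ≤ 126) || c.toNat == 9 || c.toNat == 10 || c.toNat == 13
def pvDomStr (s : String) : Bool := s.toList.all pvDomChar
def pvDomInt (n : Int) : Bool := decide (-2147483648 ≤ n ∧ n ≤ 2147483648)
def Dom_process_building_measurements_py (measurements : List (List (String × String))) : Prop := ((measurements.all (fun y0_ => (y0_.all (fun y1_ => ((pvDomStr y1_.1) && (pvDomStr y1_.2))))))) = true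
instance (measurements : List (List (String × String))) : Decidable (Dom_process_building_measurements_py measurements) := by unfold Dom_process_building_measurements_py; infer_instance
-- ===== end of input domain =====

-- B replaces A's three list-comprehension passes by one pass keeping three first-match
-- accumulators; equivalence is proved on inputs where every measurement has a 'type' key.

-- m['type'] (first-match association-list lookup; Pre_ guarantees the key is present)
def pvTy (m : List (String × String)) : String :=
  ((m.find? (fun p => p.1 == "type")).map (·.2)).getD ""

-- the three membership tests of the Python sources ('area' in t, …)
def pvPE (m : List (String × String)) : Bool :=
  PySem.Str.isIn "area" (pvTy m) && !(PySem.Str.isIn "calculated" (pvTy m))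
def pvPA (m : List (String × String)) : Bool := PySem.Str.isIn "area" (pvTy m)
def pvPH (m : List (String × String)) : Bool := PySem.Str.isIn "height" (pvTy m)

-- ===== PORT A =====
def process_building_measurements_py (measurements : List (List (String × String))) : List (String × List (String × String)) :=
  let areas := measurements.filter pvPA
  let s1 : PySem.Dict String (List (String × String)) :=
    match areas with
    | [] => PySem.Dict.empty
    | a :: _ =>
      PySem.Dict.empty.insert "area"
        (match areas.filter (fun x => !(PySem.Str.isIn "calculated" (pvTy x))) with
         | [] => a
         | e :: _ => e)
  let heights := measurements.filter pvPH
  let s2 := match heights with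
    | [] => s1
    | h :: _ => s1.insert "height" h
  s2.items

-- ===== PORT B =====
-- loop body: update each still-None slot
def pvStepB (st : Option (List (String × String)) × Option (List (String × String)) × Option (List (String × String)))
    (m : List (String × String)) :
    Option (List (String × String)) × Option (List (String × String)) × Option (List (String × String)) :=
  ((if st.1.isNone && pvPE m then some m else st.1),
   (if st.2.1.isNone && pvPA m then some m else st.2.1),
   (if st.2.2.isNone && pvPH m then some m else st.2.2))

def process_building_measurements_py_alt (measurements : List (List (String × String))) : List (String × List (String × String)) :=
  let st := measurements.foldl pvStepB (none, none, none)
  (match st.2.1 with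
   | none => []
   | some a => [("area", match st.1 with | some e => e | none => a)]) ++
  (match st.2.2 with
   | none => []
   | some h => [("height", h)])

-- ===== PRECONDITION & SPEC =====
-- Pre_: every measurement carries a 'type' key; on a missing key Python A raises KeyError.
def Pre_process_building_measurements_py (measurements : List (List (String × String))) : Prop :=
  (measurements.all (fun m => m.any (fun p => p.1 == "type"))) = true
instance (measurements : List (List (String × String))) : Decidable (Pre_process_building_measurements_py measurements) := by unfold Pre_process_building_measurements_py; infer_instance

def pvWitness_process_building_measurements_py : (List (List (String × String))) :=
  [[("type", "wall area"), ("value", "12")], [("type", "height"), ("value", "3")]]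

def Spec_process_building_measurements_py (measurements : List (List (String × String))) (out : List (String × List (String × String))) : Prop := out = process_building_measurements_py_alt measurements
instance (measurements : List (List (String × String))) (out : List (String × List (String × String))) : Decidable (Spec_process_building_measurements_py measurements out) := by unfold Spec_process_building_measurements_py; infer_instance

-- ===== CLAIM (what is proved, stated in full; the proofs are below) =====
def Claim_equal_process_building_measurements_py : Prop := ∀ (measurements : List (List (String × String))), Dom_process_building_measurements_py measurements → Pre_process_building_measurements_py measurements → Spec_process_building_measurements_py measurements (process_building_measurements_py measurements)

-- ===== LEMMAS AND PROOFS =====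

-- B's fold computes the first match of each predicate
lemma pvFoldB_eq (ms : List (List (String × String)))
    (st : Option (List (String × String)) × Option (List (String × String)) × Option (List (String × String))) :
    ms.foldl pvStepB st =
      (st.1.or (ms.filter pvPE).head?,
       st.2.1.or (ms.filter pvPA).head?,
       st.2.2.or (ms.filter pvPH).head?) := by
  induction ms generalizing st with
  | nil =>
    obtain ⟨a, b, c⟩ := st
    cases a <;> cases b <;> cases c <;> simp
  | cons m ms ih =>
    obtain ⟨a, b, c⟩ := st
    simp only [List.foldl_cons, ih, List.filter_cons, pvStepB]
    cases a <;> cases b <;> cases c <;>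
      by_cases h1 : pvPE m = true <;>
      by_cases h2 : pvPA m = true <;>
      by_cases h3 : pvPH m = true <;>
      simp [h1, h2, h3]

-- ===== VERDICT (by name: the statement is the Claim_ definition above) =====
theorem process_building_measurements_py_spec : Claim_equal_process_building_measurements_py := by
  intro ms _ _
  unfold Spec_process_building_measurements_py
  unfold process_building_measurements_py process_building_measurements_py_alt
  rw [pvFoldB_eq]
  simp only [Option.none_or]
  have hfilter : (ms.filter pvPA).filter (fun x => !(PySem.Str.isIn "calculated" (pvTy x)))
      = ms.filter pvPE := by
    rw [List.filter_filter]
    apply List.filter_congr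
    intro x _
    simp [pvPE, pvPA, Bool.and_comm]
  rw [hfilter]
  cases hA : ms.filter pvPA with
  | nil =>
    have : ms.filter pvPE = [] := by
      rw [← hfilter, hA]; rfl
    cases hH : ms.filter pvPH with
    | nil => rfl
    | cons h _ =>
      simp only [this]
      rw [PySem.Dict.items_insert_of_not_contains] <;> rfl
  | cons a as =>
    cases hE : ms.filter pvPE <;>
      cases hH : ms.filter pvPH <;>
        simp only [List.head?_cons] <;>
        first
        | (rw [PySem.Dict.items_insert_of_not_contains, PySem.Dict.items_insert_of_not_contains] <;> rfl)
        | (rw [PySem.Dict.items_insert_of_not_contains] <;> rfl)
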